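-- pv_equiv track=rewrite | github.com/maoulee/RelationRior | src/subgraph_kgqa/skill_mining/case_skill.py | _question_relation_compatibility_score
-- ===== SOURCE A (Python) =====
-- def _question_relation_compatibility_score(question: str, relation: str) -> int:
--     q = (question or "").lower()
--     rel = (relation or "").lower()
--     score = 0
--
--     if any(token in q for token in [" brother", " sister", " sibling"]):
--         if "sibling" in rel:
--             score += 8
--         if any(token in rel for token in ["children", "parents"]):
--             score -= 4
--
--     if any(token in q for token in [" child", " children", " son", " daughter"]):
--         if "children" in rel:
--             score += 8
--         if "sibling" in rel:
--             score -= 4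
--
--     if any(token in q for token in [" father", " mother", " parent", " parents"]):
--         if "parents" in rel:
--             score += 8
--         if "sibling" in rel:
--             score -= 4
--
--     if any(token in q for token in [" wife", " husband", " spouse", " married"]):
--         if any(token in rel for token in ["spouse", "married"]):
--             score += 8
--
--     if any(token in q for token in [" born", " birthplace", " where was"]) and "place_of_birth" in rel:
--         score += 6
--
--     if any(token in q for token in [" language", " speak", " spoken"]) and any(
--         token in rel for token in ["language", "languages_spoken", "official_language"]
--     ):
--         score += 5
--
--     if any(token in q for token in [" prime minister", " president", " governor", " mayor"]) and any(
--         token in rel for token in ["office_holder", "governing", "position_to_holder"]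
--     ):
--         score += 5
--
--     return score
-- ===== SOURCE B (Python) =====
-- # Factored design: extract question features and relation features once,
-- # then score with a sparse weight matrix over feature pairs.
-- _Q_FEATURES = {
--     "sib":    [" brother", " sister", " sibling"],
--     "child":  [" child", " children", " son", " daughter"],
--     "parent": [" father", " mother", " parent", " parents"],
--     "spouse": [" wife", " husband", " spouse", " married"],
--     "born":   [" born", " birthplace", " where was"],
--     "lang":   [" language", " speak", " spoken"],
--     "office": [" prime minister", " president", " governor", " mayor"],
-- }
--
-- _R_FEATURES = {
--     "sibling":    ["sibling"],
--     "chl_or_par": ["children", "parents"],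
--     "children":   ["children"],
--     "parents":    ["parents"],
--     "spouse":     ["spouse", "married"],
--     "birth":      ["place_of_birth"],
--     "lang":       ["language", "languages_spoken", "official_language"],
--     "office":     ["office_holder", "governing", "position_to_holder"],
-- }
--
-- _WEIGHTS = {
--     ("sib", "sibling"): 8,
--     ("sib", "chl_or_par"): -4,
--     ("child", "children"): 8,
--     ("child", "sibling"): -4,
--     ("parent", "parents"): 8,
--     ("parent", "sibling"): -4,
--     ("spouse", "spouse"): 8,
--     ("born", "birth"): 6,
--     ("lang", "lang"): 5,
--     ("office", "office"): 5,
-- }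
--
-- def _question_relation_compatibility_score(question: str, relation: str) -> int:
--     q = (question or "").lower()
--     rel = (relation or "").lower()
--     q_feats = [f for f, toks in _Q_FEATURES.items() if any(t in q for t in toks)]
--     r_feats = [f for f, toks in _R_FEATURES.items() if any(t in rel for t in toks)]
--     return sum(_WEIGHTS.get((qf, rf), 0) for qf in q_feats for rf in r_feats)
-- ===== Notes on version B (the rewrite author's own statement) =====
-- stated objective: alternative
-- what changed: Replaced the hard-coded if-chain by a factored design: extract named question features and relation features separately, then sum a sparse weight matrix over the cross product of present feature pairs.
import Mathlib
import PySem

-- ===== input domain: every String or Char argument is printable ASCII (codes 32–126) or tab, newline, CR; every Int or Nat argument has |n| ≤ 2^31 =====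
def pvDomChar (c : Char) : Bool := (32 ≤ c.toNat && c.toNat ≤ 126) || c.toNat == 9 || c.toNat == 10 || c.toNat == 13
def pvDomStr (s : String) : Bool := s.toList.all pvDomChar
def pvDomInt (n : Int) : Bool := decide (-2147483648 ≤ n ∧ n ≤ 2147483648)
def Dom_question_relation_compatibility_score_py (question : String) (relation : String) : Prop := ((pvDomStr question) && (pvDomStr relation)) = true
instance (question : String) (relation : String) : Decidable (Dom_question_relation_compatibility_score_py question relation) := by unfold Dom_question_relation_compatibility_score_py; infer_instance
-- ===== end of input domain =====

-- B factors A's if-chain into question/relation feature extraction plus a sparse weight matrix summed over feature pairs (objective: alternative decomposition, same cost).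

-- ===== PORT A =====
-- literal transliteration of A's if-chain; 'x or ""' on a str is the identity (the empty string coalesces to "")
def question_relation_compatibility_score_py (question : String) (relation : String) : Int :=
  let q := PySem.Str.lower question
  let rel := PySem.Str.lower relation
  let score : Int := 0
  let score :=
    if [" brother", " sister", " sibling"].any (fun t => PySem.Str.isIn t q) then
      let score := if PySem.Str.isIn "sibling" rel then score + 8 else score
      if ["children", "parents"].any (fun t => PySem.Str.isIn t rel) then score - 4 else score
    else score
  let score :=
    if [" child", " children", " son", " daughter"].any (fun t => PySem.Str.isIn t q) then
      let score := if PySem.Str.isIn "children" rel then score + 8 else score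
      if PySem.Str.isIn "sibling" rel then score - 4 else score
    else score
  let score :=
    if [" father", " mother", " parent", " parents"].any (fun t => PySem.Str.isIn t q) then
      let score := if PySem.Str.isIn "parents" rel then score + 8 else score
      if PySem.Str.isIn "sibling" rel then score - 4 else score
    else score
  let score :=
    if [" wife", " husband", " spouse", " married"].any (fun t => PySem.Str.isIn t q) then
      if ["spouse", "married"].any (fun t => PySem.Str.isIn t rel) then score + 8 else score
    else score
  let score :=
    if ([" born", " birthplace", " where was"].any (fun t => PySem.Str.isIn t q)) &&
        PySem.Str.isIn "place_of_birth" rel then score + 6 else score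
  let score :=
    if ([" language", " speak", " spoken"].any (fun t => PySem.Str.isIn t q)) &&
        (["language", "languages_spoken", "official_language"].any (fun t => PySem.Str.isIn t rel)) then score + 5 else score
  let score :=
    if ([" prime minister", " president", " governor", " mayor"].any (fun t => PySem.Str.isIn t q)) &&
        (["office_holder", "governing", "position_to_holder"].any (fun t => PySem.Str.isIn t rel)) then score + 5 else score
  score

-- ===== PORT B =====
-- question-feature dictionary (insertion order as in Source B)
def pvQFeatures : List (String × List String) :=
  [ ("sib",    [" brother", " sister", " sibling"]),
    ("child",  [" child", " children", " son", " daughter"]),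
    ("parent", [" father", " mother", " parent", " parents"]),
    ("spouse", [" wife", " husband", " spouse", " married"]),
    ("born",   [" born", " birthplace", " where was"]),
    ("lang",   [" language", " speak", " spoken"]),
    ("office", [" prime minister", " president", " governor", " mayor"]) ]

def pvRFeatures : List (String × List String) :=
  [ ("sibling",    ["sibling"]),
    ("chl_or_par", ["children", "parents"]),
    ("children",   ["children"]),
    ("parents",    ["parents"]),
    ("spouse",     ["spouse", "married"]),
    ("birth",      ["place_of_birth"]),
    ("lang",       ["language", "languages_spoken", "official_language"]),
    ("office",     ["office_holder", "governing", "position_to_holder"]) ]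

def pvWeights : PySem.Dict (String × String) Int :=
  PySem.Dict.ofList
  [ (("sib", "sibling"), 8),
    (("sib", "chl_or_par"), -4),
    (("child", "children"), 8),
    (("child", "sibling"), -4),
    (("parent", "parents"), 8),
    (("parent", "sibling"), -4),
    (("spouse", "spouse"), 8),
    (("born", "birth"), 6),
    (("lang", "lang"), 5),
    (("office", "office"), 5) ]

def question_relation_compatibility_score_py_alt (question : String) (relation : String) : Int :=
  let q := PySem.Str.lower question
  let rel := PySem.Str.lower relation
  let qFeats := (pvQFeatures.filter (fun p => p.2.any (fun t => PySem.Str.isIn t q))).map (fun p => p.1)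
  let rFeats := (pvRFeatures.filter (fun p => p.2.any (fun t => PySem.Str.isIn t rel))).map (fun p => p.1)
  qFeats.foldl (fun s qf => rFeats.foldl (fun s rf => s + PySem.Dict.getD pvWeights (qf, rf) 0) s) 0

-- ===== PRECONDITION & SPEC =====
def Spec_question_relation_compatibility_score_py (question : String) (relation : String) (out : Int) : Prop := out = question_relation_compatibility_score_py_alt question relation
instance (question : String) (relation : String) (out : Int) : Decidable (Spec_question_relation_compatibility_score_py question relation out) := by unfold Spec_question_relation_compatibility_score_py; infer_instance

-- ===== CLAIM (what is proved, stated in full; the proofs are below) =====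
def Claim_equal_question_relation_compatibility_score_py : Prop := ∀ (question : String) (relation : String), Dom_question_relation_compatibility_score_py question relation → Spec_question_relation_compatibility_score_py question relation (question_relation_compatibility_score_py question relation)

-- ===== LEMMAS AND PROOFS =====

-- ===== VERDICT (by name: the statement is the Claim_ definition above) =====
set_option maxHeartbeats 8000000 in
set_option maxRecDepth 4096 in
theorem question_relation_compatibility_score_py_spec : Claim_equal_question_relation_compatibility_score_py := by
  intro question relation _
  unfold Spec_question_relation_compatibility_score_py
  unfold question_relation_compatibility_score_py question_relation_compatibility_score_py_alt pvQFeatures pvRFeatures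
  simp only [List.filter_cons, List.filter_nil, List.any_cons, List.any_nil, Bool.or_false]
  generalize (PySem.Str.isIn "children" (PySem.Str.lower relation) || PySem.Str.isIn "parents" (PySem.Str.lower relation)) = rb
  generalize (PySem.Str.isIn "spouse" (PySem.Str.lower relation) || PySem.Str.isIn "married" (PySem.Str.lower relation)) = re
  generalize (PySem.Str.isIn "language" (PySem.Str.lower relation) || (PySem.Str.isIn "languages_spoken" (PySem.Str.lower relation) || PySem.Str.isIn "official_language" (PySem.Str.lower relation))) = rl
  generalize (PySem.Str.isIn "office_holder" (PySem.Str.lower relation) || (PySem.Str.isIn "governing" (PySem.Str.lower relation) || PySem.Str.isIn "position_to_holder" (PySem.Str.lower relation))) = ro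
  generalize PySem.Str.isIn "sibling" (PySem.Str.lower relation) = ra
  generalize PySem.Str.isIn "children" (PySem.Str.lower relation) = rc
  generalize PySem.Str.isIn "parents" (PySem.Str.lower relation) = rd
  generalize PySem.Str.isIn "place_of_birth" (PySem.Str.lower relation) = rw
  generalize (PySem.Str.isIn " brother" (PySem.Str.lower question) || (PySem.Str.isIn " sister" (PySem.Str.lower question) || PySem.Str.isIn " sibling" (PySem.Str.lower question))) = qa
  generalize (PySem.Str.isIn " child" (PySem.Str.lower question) || (PySem.Str.isIn " children" (PySem.Str.lower question) || (PySem.Str.isIn " son" (PySem.Str.lower question) || PySem.Str.isIn " daughter" (PySem.Str.lower question)))) = qb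
  generalize (PySem.Str.isIn " father" (PySem.Str.lower question) || (PySem.Str.isIn " mother" (PySem.Str.lower question) || (PySem.Str.isIn " parent" (PySem.Str.lower question) || PySem.Str.isIn " parents" (PySem.Str.lower question)))) = qc
  generalize (PySem.Str.isIn " wife" (PySem.Str.lower question) || (PySem.Str.isIn " husband" (PySem.Str.lower question) || (PySem.Str.isIn " spouse" (PySem.Str.lower question) || PySem.Str.isIn " married" (PySem.Str.lower question)))) = qd
  generalize (PySem.Str.isIn " born" (PySem.Str.lower question) || (PySem.Str.isIn " birthplace" (PySem.Str.lower question) || PySem.Str.isIn " where was" (PySem.Str.lower question))) = qe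
  generalize (PySem.Str.isIn " language" (PySem.Str.lower question) || (PySem.Str.isIn " speak" (PySem.Str.lower question) || PySem.Str.isIn " spoken" (PySem.Str.lower question))) = qf
  generalize (PySem.Str.isIn " prime minister" (PySem.Str.lower question) || (PySem.Str.isIn " president" (PySem.Str.lower question) || (PySem.Str.isIn " governor" (PySem.Str.lower question) || PySem.Str.isIn " mayor" (PySem.Str.lower question)))) = qg
  revert qa qb qc qd qe qf qg ra rb rc rd re rw rl ro
  decide
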